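-- pv_equiv track=rewrite | github.com/forestkeep/Parse-perovskite-chemical-formulas | parse_chemical_new.py | remove_outer_brackets
-- ===== SOURCE A (Python) =====
-- def remove_outer_brackets(s: str) -> str:
--     if len(s) < 2:
--         return s
--
--     if s[0] == '(' and s[-1] == ')':
--         # Проверяем, что скобки действительно внешние (сбалансированы)
--         balance = 0
--         for i, char in enumerate(s):
--             if char == '(':
--                 balance += 1
--             elif char == ')':
--                 balance -= 1
--                 if balance == 0 and i != len(s) - 1:
--                     # Нашли закрывающую скобку, которая не является последней
--                     return s
--         if balance == 0:
--             return s[1:-1]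
--
--     return s
-- ===== SOURCE B (Python) =====
-- def _match(s, i):
--     """Recursive descent: index of the first unmatched closing bracket at or after i, else None."""
--     while i < len(s):
--         c = s[i]
--         if c == ')':
--             return i
--         if c == '(':
--             j = _match(s, i + 1)   # partner of the '(' at position i
--             if j is None:
--                 return None
--             i = j + 1
--         else:
--             i += 1
--     return None
--
-- def remove_outer_brackets(s: str) -> str:
--     if len(s) < 2 or s[0] != '(' or s[-1] != ')':
--         return s
--     if _match(s, 1) == len(s) - 1:
--         return s[1:-1]
--     return s
-- ===== Notes on version B (the rewrite author's own statement) =====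
-- stated objective: alternative
-- what changed: Replaces A's integer balance counter with mid-loop early returns by a recursive-descent bracket matcher: a recursive _match skips each nested group by a recursive call and returns the index of the first unmatched closing bracket, and the strip happens iff that partner of position 0 is the last character.
import Mathlib
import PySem

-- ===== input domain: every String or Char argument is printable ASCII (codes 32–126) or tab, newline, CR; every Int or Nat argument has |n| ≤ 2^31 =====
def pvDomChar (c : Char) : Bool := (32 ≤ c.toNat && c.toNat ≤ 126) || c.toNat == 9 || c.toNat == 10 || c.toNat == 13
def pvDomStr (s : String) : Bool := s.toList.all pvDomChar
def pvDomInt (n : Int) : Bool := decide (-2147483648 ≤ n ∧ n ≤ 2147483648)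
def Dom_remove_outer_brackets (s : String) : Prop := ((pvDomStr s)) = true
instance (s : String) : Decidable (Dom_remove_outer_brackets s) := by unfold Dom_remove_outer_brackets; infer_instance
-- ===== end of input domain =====

-- B replaces A's balance counter and mid-loop early returns by a recursive-descent
-- matcher that finds the partner of the outer '(' (objective: alternative).


-- ===== PORT A =====
-- A's for-loop over enumerate(s): balance counter, early `return s` inside the loop (= none).
def aLoop (n : Nat) (bal : Int) : List (Int × Char) → Option Int
  | [] => some bal
  | (i, c) :: rest =>
    if c = '(' then aLoop n (bal + 1) rest
    else if c = ')' then
      if bal - 1 = 0 ∧ i ≠ (n : Int) - 1 then none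
      else aLoop n (bal - 1) rest
    else aLoop n bal rest

def remove_outer_brackets (s : String) : String :=
  if PySem.Str.len s < 2 then s
  else if PySem.Str.pyGet? s 0 = some '(' ∧ PySem.Str.pyGet? s (-1) = some ')' then
    match aLoop s.toList.length 0 (PySem.List.enumerate s.toList 0) with
    | none => s
    | some bal => if bal = 0 then PySem.Str.slice s (some 1) (some (-1)) else s
  else s

-- ===== PORT B =====
-- B's `_match(s, i)` over the suffix of s starting at i: returns (offset of the first
-- unmatched closing bracket, suffix after it); the subtype bound only records that the returned
-- suffix is shorter (Python's i strictly advances), for termination.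
def mtch : (l : List Char) → Option {p : Nat × List Char // p.2.length < l.length}
  | [] => none
  | c :: r =>
    if c = ')' then some ⟨(0, r), by simp⟩
    else if c = '(' then
      match mtch r with                -- j = _match(s, i + 1)
      | none => none
      | some ⟨(k, r'), h⟩ =>
        match mtch r' with             -- loop continues at i = j + 1
        | none => none
        | some ⟨(m, r''), h'⟩ => some ⟨(k + 2 + m, r''), by simp_all; omega⟩
    else
      match mtch r with                -- i += 1
      | none => none
      | some ⟨(k, r'), h⟩ => some ⟨(k + 1, r'), by simp_all; omega⟩
termination_by l => l.length
decreasing_by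
  · simp
  · simp_all; omega
  · simp

def remove_outer_brackets_alt (s : String) : String :=
  if PySem.Str.len s < 2 ∨ ¬ PySem.Str.pyGet? s 0 = some '(' ∨ ¬ PySem.Str.pyGet? s (-1) = some ')' then s
  else
    match mtch (s.toList.drop 1) with   -- _match(s, 1)
    | some p => if 1 + p.val.1 = s.toList.length - 1 then PySem.Str.slice s (some 1) (some (-1)) else s
    | none => s

-- ===== PRECONDITION & SPEC =====
def Spec_remove_outer_brackets (s : String) (out : String) : Prop := out = remove_outer_brackets_alt s
instance (s : String) (out : String) : Decidable (Spec_remove_outer_brackets s out) := by unfold Spec_remove_outer_brackets; infer_instance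

-- ===== CLAIM (what is proved, stated in full; the proofs are below) =====
def Claim_equal_remove_outer_brackets : Prop := ∀ (s : String), Dom_remove_outer_brackets s → Spec_remove_outer_brackets s (remove_outer_brackets s)

-- ===== LEMMAS AND PROOFS =====

-- Proof-only bridge: a balance-counter form of the first-unmatched-closing-bracket offset.
def scan : Nat → List Char → Option Nat
  | _, [] => none
  | b, c :: r =>
    if c = '(' then (scan (b + 1) r).map (· + 1)
    else if c = ')' then
      if b = 0 then some 0 else (scan (b - 1) r).map (· + 1)
    else (scan b r).map (· + 1)

-- B's recursive-descent matcher computes the same offset as the balance scan.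
lemma mtch_eq_scan : ∀ (N : Nat) (l : List Char), l.length ≤ N →
    (scan 0 l = (mtch l).map (fun p => p.val.1)) ∧
    (∀ b : Nat, scan (b + 1) l =
      match mtch l with
      | none => none
      | some p => (scan b p.val.2).map (fun m => p.val.1 + 1 + m)) := by
  intro N
  induction N with
  | zero =>
    intro l hl
    have hnil : l = [] := List.eq_nil_of_length_eq_zero (by omega)
    subst hnil
    exact ⟨by simp [scan, mtch], fun b => by simp [scan, mtch]⟩
  | succ N ih =>
    intro l hl
    cases l with
    | nil => exact ⟨by simp [scan, mtch], fun b => by simp [scan, mtch]⟩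
    | cons c r =>
      have hr : r.length ≤ N := by simp at hl; omega
      by_cases hc2 : c = ')'
      · have hc1 : ¬ c = '(' := by simp [hc2]
        constructor
        · simp [scan, mtch, hc2]
        · intro b
          simp only [scan, mtch, if_neg hc1, if_pos hc2, if_neg (Nat.succ_ne_zero b),
            Nat.add_sub_cancel]
          cases hsb : scan b r <;> simp [Nat.add_comm]
      · by_cases hc1 : c = '('
        · rcases hmr : mtch r with _ | ⟨⟨⟨k, r'⟩, hlt⟩⟩
          · constructor
            · have h1 := (ih r hr).2 0
              rw [hmr] at h1
              simp [scan, mtch, hc1, hmr, h1]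
            · intro b
              have h1 := (ih r hr).2 (b + 1)
              rw [hmr] at h1
              simp [scan, mtch, hc1, hmr, h1]
          · have hr' : r'.length ≤ N := by simp at hlt; omega
            rcases hmr' : mtch r' with _ | ⟨⟨⟨m, r''⟩, hlt'⟩⟩
            · constructor
              · have h1 := (ih r hr).2 0
                rw [hmr] at h1
                have h2 := (ih r' hr').1
                rw [hmr'] at h2
                simp only [Option.map_none] at h2
                simp [scan, mtch, hc1, hmr, hmr', h1, h2]
              · intro b
                have h1 := (ih r hr).2 (b + 1)
                rw [hmr] at h1
                have h2 := (ih r' hr').2 b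
                rw [hmr'] at h2
                simp [scan, mtch, hc1, hmr, hmr', h1, h2]
            · constructor
              · have h1 := (ih r hr).2 0
                rw [hmr] at h1
                have h2 := (ih r' hr').1
                rw [hmr'] at h2
                simp only [scan, mtch, if_pos hc1, if_neg (by simp [hc1] : ¬ c = ')'), hmr, hmr',
                  h1, h2]
                simp
                omega
              · intro b
                have h1 := (ih r hr).2 (b + 1)
                rw [hmr] at h1
                have h2 := (ih r' hr').2 b
                rw [hmr'] at h2
                simp only [scan, mtch, if_pos hc1, if_neg (by simp [hc1] : ¬ c = ')'), hmr, hmr',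
                  h1, h2]
                cases hsb : scan b r'' <;> simp
                omega
        · rcases hmr : mtch r with _ | ⟨⟨⟨k, r'⟩, hlt⟩⟩
          · constructor
            · have h1 := (ih r hr).1
              rw [hmr] at h1
              simp only [Option.map_none] at h1
              simp [scan, mtch, hc1, hc2, hmr, h1]
            · intro b
              have h1 := (ih r hr).2 b
              rw [hmr] at h1
              simp [scan, mtch, hc1, hc2, hmr, h1]
          · constructor
            · have h1 := (ih r hr).1
              rw [hmr] at h1
              simp [scan, mtch, hc1, hc2, hmr, h1]
            · intro b
              have h1 := (ih r hr).2 b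
              rw [hmr] at h1
              simp only [scan, mtch, if_neg hc1, if_neg hc2, hmr, h1]
              cases hsb : scan b r' <;> simp
              omega

-- The balance scan and A's loop decide alike.
lemma scan_corr (n : Nat) : ∀ (rest : List Char) (b : Nat) (i : Nat),
    1 ≤ i → i + rest.length = n →
    (∃ m, scan b rest = some m ∧
      ((i + m = n - 1 ∧ aLoop n ((b : Int) + 1) (PySem.List.enumerate rest i) = some 0) ∨
       (i + m ≠ n - 1 ∧ aLoop n ((b : Int) + 1) (PySem.List.enumerate rest i) = none)))
  ∨ (scan b rest = none ∧
      ∃ bb, aLoop n ((b : Int) + 1) (PySem.List.enumerate rest i) = some bb ∧ bb ≠ 0) := by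
  intro rest
  induction rest with
  | nil =>
    intro b i hi hn
    right
    exact ⟨rfl, (b : Int) + 1, rfl, by positivity⟩
  | cons c rest ih =>
    intro b i hi hn
    have hn' : (i + 1) + rest.length = n := by simp [List.length_cons] at hn; omega
    simp only [PySem.List.enumerate_cons, scan, aLoop]
    by_cases hc1 : c = '('
    · simp only [if_pos hc1]
      have harith : ((b : Int) + 1) + 1 = ((b + 1 : Nat) : Int) + 1 := by push_cast; ring
      rcases ih (b + 1) (i + 1) (by omega) hn' with
        ⟨m, hm, ⟨he, ha⟩ | ⟨he, ha⟩⟩ | ⟨hm, bb, ha, hbb⟩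
      · left
        refine ⟨m + 1, by simp [hm], Or.inl ⟨by omega, ?_⟩⟩
        simpa [harith] using ha
      · left
        refine ⟨m + 1, by simp [hm], Or.inr ⟨by omega, ?_⟩⟩
        simpa [harith] using ha
      · right
        refine ⟨by simp [hm], bb, ?_, hbb⟩
        simpa [harith] using ha
    · by_cases hc2 : c = ')'
      · simp only [if_neg hc1, if_pos hc2]
        cases b with
        | zero =>
          simp only [Nat.cast_zero, zero_add]
          by_cases hlast : i = n - 1
          · left
            refine ⟨0, rfl, Or.inl ⟨by omega, ?_⟩⟩
            have hrest : rest = [] := by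
              have : rest.length = 0 := by omega
              exact List.eq_nil_of_length_eq_zero this
            have hne : ¬ ((1 : Int) - 1 = 0 ∧ (i : Int) ≠ (n : Int) - 1) := by
              intro h
              exact h.2 (by omega)
            rw [if_neg hne]
            simp [hrest, PySem.List.enumerate_nil, aLoop]
          · left
            refine ⟨0, rfl, Or.inr ⟨by omega, ?_⟩⟩
            have htrue : ((1 : Int) - 1 = 0 ∧ (i : Int) ≠ (n : Int) - 1) := by
              refine ⟨by ring, ?_⟩
              intro h
              exact hlast (by omega)
            rw [if_pos htrue]
        | succ b' =>
          have hne : ¬ (((b' + 1 : Nat) : Int) + 1 - 1 = 0 ∧ (i : Int) ≠ (n : Int) - 1) := by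
            intro h
            have := h.1
            push_cast at this
            omega
          rw [if_neg hne, if_neg (by omega : ¬ (b' + 1 = 0))]
          have harith : ((b' + 1 : Nat) : Int) + 1 - 1 = ((b' : Nat) : Int) + 1 := by
            push_cast; ring
          rw [harith]
          rcases ih b' (i + 1) (by omega) hn' with
            ⟨m, hm, ⟨he, ha⟩ | ⟨he, ha⟩⟩ | ⟨hm, bb, ha, hbb⟩
          · exact Or.inl ⟨m + 1, by simp [hm], Or.inl ⟨by omega, ha⟩⟩
          · exact Or.inl ⟨m + 1, by simp [hm], Or.inr ⟨by omega, ha⟩⟩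
          · exact Or.inr ⟨by simp [hm], bb, ha, hbb⟩
      · simp only [if_neg hc1, if_neg hc2]
        rcases ih b (i + 1) (by omega) hn' with
          ⟨m, hm, ⟨he, ha⟩ | ⟨he, ha⟩⟩ | ⟨hm, bb, ha, hbb⟩
        · exact Or.inl ⟨m + 1, by simp [hm], Or.inl ⟨by omega, ha⟩⟩
        · exact Or.inl ⟨m + 1, by simp [hm], Or.inr ⟨by omega, ha⟩⟩
        · exact Or.inr ⟨by simp [hm], bb, ha, hbb⟩

-- ===== VERDICT (by name: the statement is the Claim_ definition above) =====
theorem remove_outer_brackets_spec : Claim_equal_remove_outer_brackets := by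
  intro s _
  unfold Spec_remove_outer_brackets remove_outer_brackets remove_outer_brackets_alt
  by_cases hlen : PySem.Str.len s < 2
  · rw [if_pos hlen, if_pos (Or.inl hlen)]
  · by_cases hg : PySem.Str.pyGet? s 0 = some '(' ∧ PySem.Str.pyGet? s (-1) = some ')'
    · obtain ⟨h0, h1⟩ := hg
      rw [if_neg hlen, if_pos ⟨h0, h1⟩, if_neg (by intro hor; rcases hor with h | h | h; exacts [hlen h, h h0, h h1])]
      obtain ⟨rest, hsplit⟩ : ∃ rest, s.toList = '(' :: rest := by
        have h0' : s.toList[0]? = some '(' := by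
          simpa [PySem.List.pyGet?_zero] using h0
        cases hcs : s.toList with
        | nil => rw [hcs] at h0'; simp at h0'
        | cons a t =>
          rw [hcs] at h0'; simp at h0'
          exact ⟨t, by rw [h0']⟩
      set n := s.toList.length with hn
      have hrl : 1 + rest.length = n := by rw [hn, hsplit]; simp [Nat.add_comm]
      have hdrop : s.toList.drop 1 = rest := by rw [hsplit]; simp
      have hstep : aLoop n 0 (PySem.List.enumerate s.toList 0)
          = aLoop n 1 (PySem.List.enumerate rest 1) := by
        rw [hsplit, PySem.List.enumerate_cons]
        simp [aLoop]
      have hms := (mtch_eq_scan (s.toList.drop 1).length (s.toList.drop 1) le_rfl).1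
      have hscan_eq : scan 0 (s.toList.drop 1) = scan 0 rest := by rw [hdrop]
      rcases scan_corr n rest 0 1 (by omega) (by omega) with
        ⟨m, hm, ⟨he, ha⟩ | ⟨he, ha⟩⟩ | ⟨hm, bb, ha, hbb⟩
      · simp only [Nat.cast_zero, zero_add, Nat.cast_one] at ha
        rw [hscan_eq.trans hm] at hms
        rcases hmr : mtch (s.toList.drop 1) with _ | ⟨⟨⟨k, r'⟩, hlt⟩⟩ <;> rw [hmr] at hms
        · simp at hms
        · simp only [Option.map_some] at hms
          have hkm : m = k := by simpa using hms
          rw [hstep, ha]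
          show (if (0 : Int) = 0 then PySem.Str.slice s (some 1) (some (-1)) else s)
            = if 1 + k = n - 1 then PySem.Str.slice s (some 1) (some (-1)) else s
          rw [if_pos rfl, if_pos (by omega : 1 + k = n - 1)]
      · simp only [Nat.cast_zero, zero_add, Nat.cast_one] at ha
        rw [hscan_eq.trans hm] at hms
        rcases hmr : mtch (s.toList.drop 1) with _ | ⟨⟨⟨k, r'⟩, hlt⟩⟩ <;> rw [hmr] at hms
        · simp at hms
        · simp only [Option.map_some] at hms
          have hkm : m = k := by simpa using hms
          rw [hstep, ha]
          show s = if 1 + k = n - 1 then PySem.Str.slice s (some 1) (some (-1)) else s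
          rw [if_neg (by omega : ¬ (1 + k = n - 1))]
      · simp only [Nat.cast_zero, zero_add, Nat.cast_one] at ha
        rw [hscan_eq.trans hm] at hms
        rcases hmr : mtch (s.toList.drop 1) with _ | ⟨⟨⟨k, r'⟩, hlt⟩⟩ <;> rw [hmr] at hms
        · rw [hstep, ha]
          show (if bb = 0 then PySem.Str.slice s (some 1) (some (-1)) else s) = s
          rw [if_neg hbb]
        · simp at hms
    · rw [if_neg hlen, if_neg hg]
      by_cases hc1 : PySem.Str.pyGet? s 0 = some '('
      · rw [if_pos (Or.inr (Or.inr (fun h1 => hg ⟨hc1, h1⟩)))]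
      · rw [if_pos (Or.inr (Or.inl hc1))]
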